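-- pv_equiv track=rewrite | github.com/liftkkkk/travelbert | OpenIE/preprocess.py | select_spans
-- ===== SOURCE A (Python) =====
-- def select_spans(subj_spans, pred_spans, obj_spans, nested=False):
--     """ Select optimal spo_span for multiple span candidates.
--     nested: whether predicate should contain object
--     """
--     optimal_span = None
--     if len(subj_spans) == 0 or len(pred_spans) == 0 or len(obj_spans) == 0:
--         return optimal_span
--
--     def _is_overlap(span1, span2):
--         """ Whether two spans has overlap. """
--         # span: [start, end]
--         return not (span1[1] < span2[0] or span2[1] < span1[0])
--
--     # all spans with/without overlap
--     overlap_spans, non_overlap_spans = [], []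
--     for subj_span in subj_spans:
--         for pred_span in pred_spans:
--             for obj_span in obj_spans:
--                 if _is_overlap(subj_span, pred_span) or _is_overlap(subj_span, obj_span) or \
--                     _is_overlap(pred_span, obj_span):
--                     overlap_spans.append((subj_span, pred_span, obj_span))
--                 else:
--                     non_overlap_spans.append((subj_span, pred_span, obj_span))
--
--     candidate_spans = []
--     if nested:
--         fallback_candidates = []
--         for spo_span in overlap_spans:
--             subj_span, pred_span, obj_span = spo_span
--             # predicate should contain object
--             if pred_span[0] <= obj_span[0] and obj_span[1] <= pred_span[1]:
--                 # prior choice requires subject not in predicate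
--                 if not _is_overlap(subj_span, pred_span):
--                     candidate_spans.append(spo_span)
--                 else:
--                     fallback_candidates.append(spo_span)
--         candidate_spans = candidate_spans if len(candidate_spans) > 0 else fallback_candidates
--     else:
--         candidate_spans = non_overlap_spans if len(non_overlap_spans) > 0 else overlap_spans
--
--     if len(candidate_spans) == 1:
--         return candidate_spans[0]
--
--     # choose spo_spans with shortest length, cause regex may have longer match
--     shortest_length = None
--     shortest_candidates = []
--     for spo_span in candidate_spans:
--         length = sum(span[1] - span[0] + 1 for span in spo_span)
--         if shortest_length is None or length == shortest_length:
--             shortest_length = length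
--             shortest_candidates.append(spo_span)
--         elif length < shortest_length:
--             shortest_length = length
--             shortest_candidates = [spo_span]
--
--     # choose spo_span with smallest predicate-object distance
--     optim_po_distance = None
--     optim_po_candidates = []
--     for spo_span in shortest_candidates:
--         _, pred_span, obj_span = spo_span
--         po_distance = max(obj_span[0] - pred_span[1], pred_span[0] - obj_span[1])
--         if optim_po_distance is None or po_distance == optim_po_distance:
--             optim_po_distance = po_distance
--             optim_po_candidates.append(spo_span)
--         elif po_distance < optim_po_distance:
--             optim_po_distance = po_distance
--             optim_po_candidates = [spo_span]
--
--     # choose spo_spans with closest subject-predicate-object distance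
--     closest_distance = None
--     for spo_span in optim_po_candidates:
--         spo_span_sort = sorted(spo_span)
--         distance = max(0, spo_span_sort[1][0] - spo_span_sort[0][1])  # max(0, .) for nested case
--         distance += max(0, spo_span_sort[2][0] - spo_span_sort[1][1])
--         if closest_distance is None or distance < closest_distance:
--             closest_distance = distance
--             optimal_span = spo_span
--
--     return optimal_span
-- ===== SOURCE B (Python) =====
-- def _span_key(t):
--     (s0, s1), (p0, p1), (o0, o1) = t
--     total_len = (s1 - s0) + (p1 - p0) + (o1 - o0) + 3
--     po_dist = max(o0 - p1, p0 - o1)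
--     (a0, a1), (b0, b1), (c0, c1) = sorted(t)
--     spo_dist = max(0, b0 - a1) + max(0, c0 - b1)
--     return (total_len, po_dist, spo_dist)
--
--
-- def select_spans(subj_spans, pred_spans, obj_spans, nested=False):
--     """Single streaming pass over the triple product: keep the best (key, triple)
--     per priority class instead of materialising candidate lists and filtering."""
--     best_primary = None   # (key, triple), first-seen minimum of the preferred class
--     best_fallback = None  # same for the fallback class
--     for s in subj_spans:
--         for p in pred_spans:
--             for o in obj_spans:
--                 touching = (s[0] <= p[1] and p[0] <= s[1]) or \
--                            (s[0] <= o[1] and o[0] <= s[1]) or \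
--                            (p[0] <= o[1] and o[0] <= p[1])
--                 if nested:
--                     if not (touching and p[0] <= o[0] and o[1] <= p[1]):
--                         continue
--                     demote = s[0] <= p[1] and p[0] <= s[1]
--                 else:
--                     demote = touching
--                 t = (s, p, o)
--                 k = _span_key(t)
--                 if demote:
--                     if best_fallback is None or k < best_fallback[0]:
--                         best_fallback = (k, t)
--                 else:
--                     if best_primary is None or k < best_primary[0]:
--                         best_primary = (k, t)
--     if best_primary is not None:
--         return best_primary[1]
--     if best_fallback is not None:
--         return best_fallback[1]
--     return None
-- ===== Notes on version B (the rewrite author's own statement) =====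
-- stated objective: alternative
-- what changed: B makes one streaming pass over the subject x predicate x object product, classifying each triple into a preferred or fallback priority class on the fly and keeping only the current best (key, triple) per class in O(1) memory with first-seen tie-breaking, instead of A's materialised overlap/non-overlap candidate lists followed by three sequential argmin filtering passes.
import Mathlib
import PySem

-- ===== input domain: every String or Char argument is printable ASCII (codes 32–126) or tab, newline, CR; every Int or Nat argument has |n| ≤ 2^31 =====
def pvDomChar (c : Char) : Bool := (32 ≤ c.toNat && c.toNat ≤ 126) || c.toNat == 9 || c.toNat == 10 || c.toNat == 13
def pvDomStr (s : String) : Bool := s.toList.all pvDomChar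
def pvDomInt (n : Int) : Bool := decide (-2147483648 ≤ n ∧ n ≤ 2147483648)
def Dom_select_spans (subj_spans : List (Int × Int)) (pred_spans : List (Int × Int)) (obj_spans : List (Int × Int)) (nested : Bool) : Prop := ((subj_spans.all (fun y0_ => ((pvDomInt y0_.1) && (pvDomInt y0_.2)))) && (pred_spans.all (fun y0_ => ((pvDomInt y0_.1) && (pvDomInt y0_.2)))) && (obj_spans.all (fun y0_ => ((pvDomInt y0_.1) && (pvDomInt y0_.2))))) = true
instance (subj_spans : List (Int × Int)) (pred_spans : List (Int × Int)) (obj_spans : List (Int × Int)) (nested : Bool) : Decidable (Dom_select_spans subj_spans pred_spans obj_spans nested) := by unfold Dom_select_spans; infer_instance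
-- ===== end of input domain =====

-- B replaces A's materialised candidate lists and three argmin filtering passes by one streaming
-- pass over the triple product keeping the best (key, triple) per priority class (objective: alternative).

-- ===== PORT A =====

-- _is_overlap(span1, span2): not (span1[1] < span2[0] or span2[1] < span1[0])
def pvOverlapA (s1 s2 : Int × Int) : Bool := !(decide (s1.2 < s2.1) || decide (s2.2 < s1.1))

-- sum(span[1] - span[0] + 1 for span in spo_span)
def pvLenSum (t : (Int × Int) × (Int × Int) × (Int × Int)) : Int :=
  (t.1.2 - t.1.1 + 1) + (t.2.1.2 - t.2.1.1 + 1) + (t.2.2.2 - t.2.2.1 + 1)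

-- max(obj_span[0] - pred_span[1], pred_span[0] - obj_span[1])  (same line in A and in B's key)
def pvPoDist (t : (Int × Int) × (Int × Int) × (Int × Int)) : Int :=
  max (t.2.2.1 - t.2.1.2) (t.2.1.1 - t.2.2.2)

-- spo_span_sort = sorted(spo_span); max(0, .) + max(0, .)  (same lines in A and in B's key;
-- sorted of a 3-tuple of pairs = sorted2 with the pair components as tuple key, Python's lexicographic pair order)
def pvSortDist (t : (Int × Int) × (Int × Int) × (Int × Int)) : Int :=
  match PySem.List.sorted2 [t.1, t.2.1, t.2.2] Prod.fst Prod.snd with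
  | [a, b, c] => max 0 (b.1 - a.2) + max 0 (c.1 - b.2)
  | _ => 0  -- unreachable: sorted2 permutes the 3-element list

-- one filtering pass of A (shortest-length / smallest-po-distance loops share this shape)
def pvPassStep (f : (Int × Int) × (Int × Int) × (Int × Int) → Int)
    (st : Option Int × List ((Int × Int) × (Int × Int) × (Int × Int)))
    (t : (Int × Int) × (Int × Int) × (Int × Int)) :
    Option Int × List ((Int × Int) × (Int × Int) × (Int × Int)) :=
  let length := f t
  match st.1 with
  | none => (some length, st.2 ++ [t])
  | some m =>
    if length = m then (some length, st.2 ++ [t])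
    else if length < m then (some length, [t])
    else st

-- A's final closest-distance loop body
def pvP3Step (st : Option Int × Option ((Int × Int) × (Int × Int) × (Int × Int)))
    (t : (Int × Int) × (Int × Int) × (Int × Int)) :
    Option Int × Option ((Int × Int) × (Int × Int) × (Int × Int)) :=
  let d := pvSortDist t
  match st.1 with
  | none => (some d, some t)
  | some c => if d < c then (some d, some t) else st

def select_spans (subj_spans : List (Int × Int)) (pred_spans : List (Int × Int)) (obj_spans : List (Int × Int)) (nested : Bool) : Option ((Int × Int) × (Int × Int) × (Int × Int)) :=
  if subj_spans.length = 0 ∨ pred_spans.length = 0 ∨ obj_spans.length = 0 then none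
  else
    let ovnov := subj_spans.foldl (fun acc s =>
      pred_spans.foldl (fun acc p =>
        obj_spans.foldl (fun acc o =>
          if pvOverlapA s p || pvOverlapA s o || pvOverlapA p o then
            (acc.1 ++ [(s, p, o)], acc.2)
          else
            (acc.1, acc.2 ++ [(s, p, o)])) acc) acc) ([], [])
    let candidate_spans :=
      if nested then
        let cf := ovnov.1.foldl (fun acc t =>
          if decide (t.2.1.1 ≤ t.2.2.1) && decide (t.2.2.2 ≤ t.2.1.2) then
            if !pvOverlapA t.1 t.2.1 then (acc.1 ++ [t], acc.2)
            else (acc.1, acc.2 ++ [t])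
          else acc) ([], [])
        if cf.1.length > 0 then cf.1 else cf.2
      else
        if ovnov.2.length > 0 then ovnov.2 else ovnov.1
    if candidate_spans.length = 1 then PySem.List.pyGet? candidate_spans 0
    else
      let p1 := candidate_spans.foldl (pvPassStep pvLenSum) (none, [])
      let p2 := p1.2.foldl (pvPassStep pvPoDist) (none, [])
      let p3 := p2.2.foldl pvP3Step (none, none)
      p3.2

-- ===== PORT B =====

-- overlap test a[0] <= b[1] and b[0] <= a[1] (Source B writes it inline for 'touching' / 'demote')
def pvOverlapB (a b : Int × Int) : Bool := decide (a.1 ≤ b.2) && decide (b.1 ≤ a.2)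

-- _span_key(t) = (total_len, po_dist, spo_dist); Python compares tuples lexicographically = Lex order
def pvKeyB (t : (Int × Int) × (Int × Int) × (Int × Int)) : Lex (Int × Lex (Int × Int)) :=
  let total_len := (t.1.2 - t.1.1) + (t.2.1.2 - t.2.1.1) + (t.2.2.2 - t.2.2.1) + 3
  toLex (total_len, toLex (pvPoDist t, pvSortDist t))

-- 'if best is None or k < best[0]: best = (k, t)'
def pvUpd (cur : Option (Lex (Int × Lex (Int × Int)) × ((Int × Int) × (Int × Int) × (Int × Int))))
    (k : Lex (Int × Lex (Int × Int))) (t : (Int × Int) × (Int × Int) × (Int × Int)) :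
    Option (Lex (Int × Lex (Int × Int)) × ((Int × Int) × (Int × Int) × (Int × Int))) :=
  match cur with
  | none => some (k, t)
  | some c => if k < c.1 then some (k, t) else cur

-- the body of Source B's innermost loop: classify the triple and update the class's running best
def pvStepB (nested : Bool)
    (best : Option (Lex (Int × Lex (Int × Int)) × ((Int × Int) × (Int × Int) × (Int × Int)))
            × Option (Lex (Int × Lex (Int × Int)) × ((Int × Int) × (Int × Int) × (Int × Int))))
    (s p o : Int × Int) :
    Option (Lex (Int × Lex (Int × Int)) × ((Int × Int) × (Int × Int) × (Int × Int)))
    × Option (Lex (Int × Lex (Int × Int)) × ((Int × Int) × (Int × Int) × (Int × Int))) :=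
  let touching := pvOverlapB s p || pvOverlapB s o || pvOverlapB p o
  if nested && !(touching && decide (p.1 ≤ o.1) && decide (o.2 ≤ p.2)) then best  -- 'continue'
  else
    let demote := if nested then pvOverlapB s p else touching
    let k := pvKeyB (s, p, o)
    if demote then (best.1, pvUpd best.2 k (s, p, o))
    else (pvUpd best.1 k (s, p, o), best.2)

def select_spans_alt (subj_spans : List (Int × Int)) (pred_spans : List (Int × Int)) (obj_spans : List (Int × Int)) (nested : Bool) : Option ((Int × Int) × (Int × Int) × (Int × Int)) :=
  match subj_spans.foldl (fun best s =>
    pred_spans.foldl (fun best p =>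
      obj_spans.foldl (fun best o => pvStepB nested best s p o) best) best) (none, none) with
  | (some c, _) => some c.2        -- 'if best_primary is not None: return best_primary[1]'
  | (none, some c) => some c.2     -- 'if best_fallback is not None: return best_fallback[1]'
  | (none, none) => none

-- ===== PRECONDITION & SPEC =====
def Spec_select_spans (subj_spans : List (Int × Int)) (pred_spans : List (Int × Int)) (obj_spans : List (Int × Int)) (nested : Bool) (out : Option ((Int × Int) × (Int × Int) × (Int × Int))) : Prop := out = select_spans_alt subj_spans pred_spans obj_spans nested
instance (subj_spans : List (Int × Int)) (pred_spans : List (Int × Int)) (obj_spans : List (Int × Int)) (nested : Bool) (out : Option ((Int × Int) × (Int × Int) × (Int × Int))) : Decidable (Spec_select_spans subj_spans pred_spans obj_spans nested out) := by unfold Spec_select_spans; infer_instance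

-- ===== CLAIM (what is proved, stated in full; the proofs are below) =====
def Claim_equal_select_spans : Prop := ∀ (subj_spans : List (Int × Int)) (pred_spans : List (Int × Int)) (obj_spans : List (Int × Int)) (nested : Bool), Dom_select_spans subj_spans pred_spans obj_spans nested → Spec_select_spans subj_spans pred_spans obj_spans nested (select_spans subj_spans pred_spans obj_spans nested)

-- ===== LEMMAS AND PROOFS =====

-- touching as a predicate on a triple
def pvAnyOverlap (t : (Int × Int) × (Int × Int) × (Int × Int)) : Bool :=
  pvOverlapB t.1 t.2.1 || pvOverlapB t.1 t.2.2 || pvOverlapB t.2.1 t.2.2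

-- the two overlap tests agree
theorem pvOverlap_eq (a b : Int × Int) : pvOverlapA a b = pvOverlapB a b := by
  unfold pvOverlapA pvOverlapB
  rw [Bool.eq_iff_iff]
  simp
  omega

-- A's overlap condition on a triple is B's touching predicate
theorem pvCondA_eq (t : (Int × Int) × (Int × Int) × (Int × Int)) :
    (pvOverlapA t.1 t.2.1 || pvOverlapA t.1 t.2.2 || pvOverlapA t.2.1 t.2.2) = pvAnyOverlap t := by
  simp [pvAnyOverlap, pvOverlap_eq]

-- generic partition loop = a pair of filters
theorem pvFoldl_partition {α : Type} (c : α → Bool) (xs : List α) (acc : List α × List α) :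
    xs.foldl (fun acc t => if c t then (acc.1 ++ [t], acc.2) else (acc.1, acc.2 ++ [t])) acc
      = (acc.1 ++ xs.filter c, acc.2 ++ xs.filter (fun t => !c t)) := by
  induction xs generalizing acc with
  | nil => simp
  | cons x xs ih =>
    simp only [List.foldl_cons, List.filter_cons]
    by_cases h : c x = true <;> simp [h, ih, List.append_assoc]

-- generic pairwise-append loop = a pair of flatMaps
theorem pvFoldl_pairappend {γ α : Type} (F G : γ → List α) (xs : List γ) (acc : List α × List α) :
    xs.foldl (fun acc y => (acc.1 ++ F y, acc.2 ++ G y)) acc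
      = (acc.1 ++ xs.flatMap F, acc.2 ++ xs.flatMap G) := by
  induction xs generalizing acc with
  | nil => simp
  | cons x xs ih => simp [ih, List.append_assoc]

-- filter distributes over flatMap
theorem pvFilter_flatMap {γ α : Type} (F : γ → List α) (p : α → Bool) (xs : List γ) :
    (xs.flatMap F).filter p = xs.flatMap (fun y => (F y).filter p) := by
  induction xs with
  | nil => simp
  | cons x xs ih => simp [List.filter_append, ih]

-- A's triple nested loop builds exactly (filter c triples, filter !c triples)
theorem pvBuildA (subj pred obj : List (Int × Int)) :
    (subj.foldl (fun acc s =>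
      pred.foldl (fun acc p =>
        obj.foldl (fun acc o =>
          if pvOverlapA s p || pvOverlapA s o || pvOverlapA p o then
            (acc.1 ++ [(s, p, o)], acc.2)
          else
            (acc.1, acc.2 ++ [(s, p, o)])) acc) acc)
      (([], []) : List ((Int × Int) × (Int × Int) × (Int × Int)) × List ((Int × Int) × (Int × Int) × (Int × Int))))
    = ((subj.flatMap (fun s => pred.flatMap (fun p => obj.map (fun o => (s, p, o))))).filter pvAnyOverlap,
       (subj.flatMap (fun s => pred.flatMap (fun p => obj.map (fun o => (s, p, o))))).filter (fun t => !pvAnyOverlap t)) := by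
  have hin : ∀ (s p : Int × Int) (acc : List ((Int × Int) × (Int × Int) × (Int × Int)) × List ((Int × Int) × (Int × Int) × (Int × Int))),
      obj.foldl (fun acc o =>
        if pvOverlapA s p || pvOverlapA s o || pvOverlapA p o then
          (acc.1 ++ [(s, p, o)], acc.2)
        else (acc.1, acc.2 ++ [(s, p, o)])) acc
      = (acc.1 ++ (obj.map (fun o => (s, p, o))).filter pvAnyOverlap,
         acc.2 ++ (obj.map (fun o => (s, p, o))).filter (fun t => !pvAnyOverlap t)) := by
    intro s p acc
    have h := pvFoldl_partition pvAnyOverlap (obj.map (fun o => (s, p, o))) acc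
    rw [List.foldl_map] at h
    simp only [← pvCondA_eq] at h ⊢
    exact h
  have hmid : ∀ (s : Int × Int) (acc : List ((Int × Int) × (Int × Int) × (Int × Int)) × List ((Int × Int) × (Int × Int) × (Int × Int))),
      pred.foldl (fun acc p =>
        obj.foldl (fun acc o =>
          if pvOverlapA s p || pvOverlapA s o || pvOverlapA p o then
            (acc.1 ++ [(s, p, o)], acc.2)
          else (acc.1, acc.2 ++ [(s, p, o)])) acc) acc
      = (acc.1 ++ pred.flatMap (fun p => (obj.map (fun o => (s, p, o))).filter pvAnyOverlap),
         acc.2 ++ pred.flatMap (fun p => (obj.map (fun o => (s, p, o))).filter (fun t => !pvAnyOverlap t))) := by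
    intro s acc
    simp only [hin]
    exact pvFoldl_pairappend _ _ pred acc
  simp only [hmid]
  rw [pvFoldl_pairappend]
  simp [pvFilter_flatMap]

-- A's nested-case loop = a pair of filters
theorem pvFoldl_partition3 {α : Type} (cont prior : α → Bool) (xs : List α) (acc : List α × List α) :
    xs.foldl (fun acc t =>
      if cont t then
        if prior t then (acc.1 ++ [t], acc.2) else (acc.1, acc.2 ++ [t])
      else acc) acc
      = (acc.1 ++ xs.filter (fun t => cont t && prior t),
         acc.2 ++ xs.filter (fun t => cont t && !prior t)) := by
  induction xs generalizing acc with
  | nil => simp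
  | cons x xs ih =>
    simp only [List.foldl_cons, List.filter_cons]
    by_cases h1 : cont x = true <;> by_cases h2 : prior x = true <;>
      simp [h1, h2, ih, List.append_assoc]

-- running minimum of f over a list
def pvMinv (f : (Int × Int) × (Int × Int) × (Int × Int) → Int) (a : Int)
    (xs : List ((Int × Int) × (Int × Int) × (Int × Int))) : Int :=
  xs.foldl (fun m y => min m (f y)) a

theorem pvMinv_le_init (f) (a : Int) (xs) : pvMinv f a xs ≤ a := by
  induction xs generalizing a with
  | nil => simp [pvMinv]
  | cons y ys ih =>
    have hstep : pvMinv f a (y :: ys) = pvMinv f (min a (f y)) ys := rfl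
    have h := ih (min a (f y))
    rw [hstep]
    omega

theorem pvMinv_le_mem (f) (a : Int) (xs) : ∀ y ∈ xs, pvMinv f a xs ≤ f y := by
  induction xs generalizing a with
  | nil => simp
  | cons z zs ih =>
    intro y hy
    have hstep : pvMinv f a (z :: zs) = pvMinv f (min a (f z)) zs := rfl
    rw [hstep]
    rcases List.mem_cons.mp hy with h | h
    · subst h
      have h1 := pvMinv_le_init f (min a (f y)) zs
      omega
    · exact ih (min a (f z)) y h

theorem pvMinv_attained (f) (a : Int) (xs) :
    pvMinv f a xs = a ∨ ∃ y ∈ xs, f y = pvMinv f a xs := by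
  induction xs generalizing a with
  | nil => left; rfl
  | cons z zs ih =>
    have hstep : pvMinv f a (z :: zs) = pvMinv f (min a (f z)) zs := rfl
    rcases ih (min a (f z)) with h | ⟨y, hy, hfy⟩
    · rcases le_or_gt a (f z) with hz | hz
      · left; rw [hstep, h]; omega
      · right; exact ⟨z, List.mem_cons_self, by rw [hstep, h]; omega⟩
    · right; exact ⟨y, List.mem_cons_of_mem _ hy, by rw [hstep]; exact hfy⟩

-- the seeded running minimum is a lower bound for, and attained on, x :: xs
theorem pvMinv_min_all (f) (x) (xs) : ∀ y ∈ x :: xs, pvMinv f (f x) xs ≤ f y := by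
  intro y hy
  rcases List.mem_cons.mp hy with h | h
  · subst h; exact pvMinv_le_init f (f y) xs
  · exact pvMinv_le_mem f (f x) xs y h

theorem pvMinv_att_cons (f) (x) (xs) : ∃ y ∈ x :: xs, f y = pvMinv f (f x) xs := by
  rcases pvMinv_attained f (f x) xs with h | ⟨y, hy, hfy⟩
  · exact ⟨x, List.mem_cons_self, h.symm⟩
  · exact ⟨y, List.mem_cons_of_mem _ hy, hfy⟩

-- invariant of A's filtering passes
theorem pvPass_inv (f) (l) (m : Int) (acc) :
    l.foldl (pvPassStep f) (some m, acc)
      = (some (pvMinv f m l),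
         (if pvMinv f m l = m then acc else []) ++ l.filter (fun y => decide (f y = pvMinv f m l))) := by
  induction l generalizing m acc with
  | nil => simp [pvMinv]
  | cons y ys ih =>
    have hm : pvMinv f m (y :: ys) = pvMinv f (min m (f y)) ys := rfl
    rw [List.foldl_cons]
    by_cases h1 : f y = m
    · have hstep : pvPassStep f (some m, acc) y = (some m, acc ++ [y]) := by
        simp [pvPassStep, h1]
      have hmin : min m (f y) = m := by omega
      rw [hstep, ih m (acc ++ [y]), hm, hmin]
      by_cases h2 : pvMinv f m ys = m
      · have hd : decide (f y = pvMinv f m ys) = true := by simp [h1, h2]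
        simp [h2, List.filter_cons, hd, List.append_assoc, h1] <;> omega
      · have hd : decide (f y = pvMinv f m ys) = false := by
          have hle := pvMinv_le_init f m ys
          simp; omega
        simp [h2, List.filter_cons, hd, h1] <;> omega
    · by_cases h3 : f y < m
      · have hstep : pvPassStep f (some m, acc) y = (some (f y), [y]) := by
          simp [pvPassStep, h1, h3]
        have hmin : min m (f y) = f y := by omega
        rw [hstep, ih (f y) [y], hm, hmin]
        have hle := pvMinv_le_init f (f y) ys
        have hMm : ¬ (pvMinv f (f y) ys = m) := by omega
        by_cases h4 : pvMinv f (f y) ys = f y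
        · have hd : decide (f y = pvMinv f (f y) ys) = true := by simp [h4]
          simp [h4, hMm, List.filter_cons, hd] <;> omega
        · have hd : decide (f y = pvMinv f (f y) ys) = false := by simp; omega
          simp [h4, hMm, List.filter_cons, hd] <;> omega
      · have hstep : pvPassStep f (some m, acc) y = (some m, acc) := by
          simp [pvPassStep, h1, h3]
        have hle := pvMinv_le_init f m ys
        have hmin : min m (f y) = m := by omega
        rw [hstep, ih m acc, hm, hmin]
        have hd : decide (f y = pvMinv f m ys) = false := by simp; omega
        simp [List.filter_cons, hd] <;> omega

-- a full pass from the initial state = a min-value filter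
theorem pvPass_filter (f) (x) (xs) :
    ((x :: xs).foldl (pvPassStep f) (none, [])).2
      = (x :: xs).filter (fun y => decide (f y = pvMinv f (f x) xs)) := by
  have hstep : pvPassStep f (none, []) x = (some (f x), [x]) := by
    simp [pvPassStep]
  rw [List.foldl_cons, hstep, pvPass_inv f xs (f x) [x]]
  by_cases h : pvMinv f (f x) xs = f x
  · have hd : decide (f x = pvMinv f (f x) xs) = true := by simp [h]
    simp [h, List.filter_cons, hd] <;> omega
  · have hd : decide (f x = pvMinv f (f x) xs) = false := by simp; omega
    simp [h, List.filter_cons, hd] <;> omega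

-- left fold keeping the first strict minimum
def pvMinFold {α κ : Type} [LinearOrder κ] (key : α → κ) (acc : Option α) (l : List α) : Option α :=
  l.foldl (fun acc x => match acc with
    | none => some x
    | some m => if key x < key m then some x else some m) acc

theorem pvMinFold_some {α κ : Type} [LinearOrder κ] (key : α → κ) :
    ∀ (xs : List α) (x : α), pvMinFold key (some x) xs
      = some (match pvMinFold key none xs with
              | none => x
              | some m => if key m < key x then m else x)
  | [], x => rfl
  | y :: ys, x => by
    have hcons : pvMinFold key (some x) (y :: ys)
        = pvMinFold key (if key y < key x then some y else some x) ys := rfl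
    have hnone : pvMinFold key none (y :: ys) = pvMinFold key (some y) ys := rfl
    rw [hcons, hnone, pvMinFold_some key ys y]
    by_cases hxy : key y < key x
    · rw [if_pos hxy, pvMinFold_some key ys y]
      rcases h : pvMinFold key none ys with _ | m
      · simp [hxy]
      · by_cases hmy : key m < key y
        · have hmx : key m < key x := lt_trans hmy hxy
          simp [hmy, hmx]
        · simp [hmy, hxy]
    · rw [if_neg hxy, pvMinFold_some key ys x]
      rcases h : pvMinFold key none ys with _ | m
      · simp [hxy]
      · by_cases hmy : key m < key y
        · simp [hmy]
        · have h1 : ¬ key m < key x := fun hc => hmy (lt_of_lt_of_le hc (le_of_not_gt hxy))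
          simp [hmy, hxy, h1]

-- min? unfolded one step on the right
theorem pvMin?_cons {α κ : Type} [LinearOrder κ] (key : α → κ) (x : α) (xs : List α) :
    PySem.List.min? (x :: xs) key
      = some (match PySem.List.min? xs key with
              | none => x
              | some m => if key m < key x then m else x) := by
  have h0 : PySem.List.min? (x :: xs) key = pvMinFold key (some x) xs := rfl
  have h1 : PySem.List.min? xs key = pvMinFold key none xs := rfl
  rw [h0, h1, pvMinFold_some]

-- min? is the first element attaining the minimum key value
theorem pvMin?_eq_head_filter {α κ : Type} [LinearOrder κ] (key : α → κ) (l : List α) (M : κ)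
    (hmin : ∀ y ∈ l, M ≤ key y) (hatt : ∃ y ∈ l, key y = M) :
    PySem.List.min? l key = (l.filter (fun y => decide (key y = M))).head? := by
  induction l with
  | nil => rfl
  | cons x xs ih =>
    rw [pvMin?_cons, List.filter_cons]
    by_cases hx : key x = M
    · rw [if_pos (by simpa using hx)]
      rcases h : PySem.List.min? xs key with _ | m
      · simp
      · have hmem := PySem.List.min?_mem h
        have hMm : M ≤ key m := hmin m (List.mem_cons_of_mem _ hmem)
        have : ¬ key m < key x := by rw [hx]; exact not_lt.mpr hMm
        simp [this]
    · rw [if_neg (by simpa using hx)]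
      obtain ⟨y, hy, hky⟩ := hatt
      have hyx : y ∈ xs := by
        rcases List.mem_cons.mp hy with h | h
        · exact absurd (h ▸ hky) hx
        · exact h
      have ihx := ih (fun z hz => hmin z (List.mem_cons_of_mem _ hz)) ⟨y, hyx, hky⟩
      have hfil : y ∈ xs.filter (fun z => decide (key z = M)) :=
        List.mem_filter.mpr ⟨hyx, by simpa using hky⟩
      rcases hf : xs.filter (fun z => decide (key z = M)) with _ | ⟨m0, t⟩
      · rw [hf] at hfil; exact absurd hfil (List.not_mem_nil)
      · have hm0 : key m0 = M := by
          have : m0 ∈ xs.filter (fun z => decide (key z = M)) := by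
            rw [hf]; exact List.mem_cons_self
          simpa using (List.of_mem_filter this)
        rw [hf] at ihx
        rw [ihx]
        have hlt : key m0 < key x := by
          rw [hm0]
          exact lt_of_le_of_ne (hmin x List.mem_cons_self) (fun hc => hx hc.symm)
        simp [hlt]

-- A's last loop is min? with key pvSortDist
theorem pvP3_eq (l : List ((Int × Int) × (Int × Int) × (Int × Int))) :
    (l.foldl pvP3Step (none, none)).2 = PySem.List.min? l pvSortDist := by
  have hgen : ∀ (l : List ((Int × Int) × (Int × Int) × (Int × Int)))
      (st : Option ((Int × Int) × (Int × Int) × (Int × Int))),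
      l.foldl pvP3Step (st.map pvSortDist, st)
        = ((pvMinFold pvSortDist st l).map pvSortDist, pvMinFold pvSortDist st l) := by
    intro l
    induction l with
    | nil => intro st; rfl
    | cons y ys ih =>
      intro st
      have hstep : pvP3Step (st.map pvSortDist, st) y
          = ((pvMinFold pvSortDist st [y]).map pvSortDist, pvMinFold pvSortDist st [y]) := by
        rcases st with _ | m
        · rfl
        · show pvP3Step (some (pvSortDist m), some m) y = _
          by_cases h : pvSortDist y < pvSortDist m
          · simp [pvP3Step, pvMinFold, h]
          · simp [pvP3Step, pvMinFold, h]
      have hfold : pvMinFold pvSortDist st (y :: ys) = pvMinFold pvSortDist (pvMinFold pvSortDist st [y]) ys := rfl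
      rw [List.foldl_cons, hstep, ih (pvMinFold pvSortDist st [y]), hfold]
  have h := hgen l none
  have h2 : PySem.List.min? l pvSortDist = pvMinFold pvSortDist none l := rfl
  rw [h2]
  exact congrArg Prod.snd h

-- B's key in terms of A's component functions
theorem pvKeyB_eq (t : (Int × Int) × (Int × Int) × (Int × Int)) :
    pvKeyB t = toLex (pvLenSum t, toLex (pvPoDist t, pvSortDist t)) := by
  unfold pvKeyB
  have h : (t.1.2 - t.1.1) + (t.2.1.2 - t.2.1.1) + (t.2.2.2 - t.2.2.1) + 3 = pvLenSum t := by
    unfold pvLenSum; ring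
  rw [h]

-- A's three passes = one lexicographic min?
theorem pvSelect_min_eq (l : List ((Int × Int) × (Int × Int) × (Int × Int))) :
    (((l.foldl (pvPassStep pvLenSum) (none, [])).2.foldl (pvPassStep pvPoDist) (none, [])).2.foldl
        pvP3Step (none, none)).2
      = PySem.List.min? l pvKeyB := by
  rcases l with _ | ⟨x, xs⟩
  · rfl
  · rw [pvPass_filter pvLenSum x xs]
    set M1 := pvMinv pvLenSum (pvLenSum x) xs with hM1
    set l1 := (x :: xs).filter (fun y => decide (pvLenSum y = M1)) with hl1
    obtain ⟨ya, hya, hfa⟩ := pvMinv_att_cons pvLenSum x xs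
    have hyal1 : ya ∈ l1 := by
      rw [hl1]; exact List.mem_filter.mpr ⟨hya, by rw [← hM1] at hfa; simpa using hfa⟩
    have hl1ne : l1 ≠ [] := by
      intro h; rw [h] at hyal1; exact absurd hyal1 List.not_mem_nil
    obtain ⟨x1, xs1, hcons1⟩ := List.exists_cons_of_ne_nil hl1ne
    rw [hcons1, pvPass_filter pvPoDist x1 xs1]
    set M2 := pvMinv pvPoDist (pvPoDist x1) xs1 with hM2
    set l2 := (x1 :: xs1).filter (fun y => decide (pvPoDist y = M2)) with hl2
    obtain ⟨yb, hyb, hfb⟩ := pvMinv_att_cons pvPoDist x1 xs1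
    have hybl2 : yb ∈ l2 := by
      rw [hl2]; exact List.mem_filter.mpr ⟨hyb, by rw [← hM2] at hfb; simpa using hfb⟩
    have hl2ne : l2 ≠ [] := by
      intro h; rw [h] at hybl2; exact absurd hybl2 List.not_mem_nil
    obtain ⟨x2, xs2, hcons2⟩ := List.exists_cons_of_ne_nil hl2ne
    rw [pvP3_eq]
    set M3 := pvMinv pvSortDist (pvSortDist x2) xs2 with hM3
    have hminA : ∀ y ∈ l2, M3 ≤ pvSortDist y := by
      rw [hcons2, hM3]; exact pvMinv_min_all pvSortDist x2 xs2
    have hattA : ∃ y ∈ l2, pvSortDist y = M3 := by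
      rw [hcons2, hM3]; exact pvMinv_att_cons pvSortDist x2 xs2
    rw [pvMin?_eq_head_filter pvSortDist l2 M3 hminA hattA]
    have hmem1 : ∀ y, y ∈ l1 ↔ y ∈ x :: xs ∧ pvLenSum y = M1 := by
      intro y; rw [hl1, List.mem_filter]; simp
    have hmem2 : ∀ y, y ∈ l2 ↔ y ∈ l1 ∧ pvPoDist y = M2 := by
      intro y; rw [hl2, List.mem_filter, ← hcons1]; simp
    have hminB : ∀ y ∈ x :: xs, toLex (M1, toLex (M2, M3)) ≤ pvKeyB y := by
      intro y hy
      rw [pvKeyB_eq, Prod.Lex.toLex_le_toLex]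
      have h1 : M1 ≤ pvLenSum y := by rw [hM1]; exact pvMinv_min_all pvLenSum x xs y hy
      rcases lt_or_eq_of_le h1 with h | h
      · exact Or.inl h
      · refine Or.inr ⟨h, ?_⟩
        have hyl1 : y ∈ l1 := (hmem1 y).mpr ⟨hy, h.symm⟩
        rw [Prod.Lex.toLex_le_toLex]
        have h2 : M2 ≤ pvPoDist y := by
          rw [hM2]
          exact pvMinv_min_all pvPoDist x1 xs1 y (by rw [← hcons1]; exact hyl1)
        rcases lt_or_eq_of_le h2 with h2' | h2'
        · exact Or.inl h2'
        · refine Or.inr ⟨h2', ?_⟩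
          have hyl2 : y ∈ l2 := (hmem2 y).mpr ⟨hyl1, h2'.symm⟩
          exact hminA y hyl2
    have hattB : ∃ y ∈ x :: xs, pvKeyB y = toLex (M1, toLex (M2, M3)) := by
      obtain ⟨y, hy2, hy3⟩ := hattA
      obtain ⟨hyl1, h2⟩ := (hmem2 y).mp hy2
      obtain ⟨hyl, h1⟩ := (hmem1 y).mp hyl1
      exact ⟨y, hyl, by rw [pvKeyB_eq, h1, h2, hy3]⟩
    rw [pvMin?_eq_head_filter pvKeyB (x :: xs) (toLex (M1, toLex (M2, M3))) hminB hattB]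
    congr 1
    rw [hl2, ← hcons1, hl1, List.filter_filter, List.filter_filter]
    refine (List.filter_congr ?_).symm
    intro y hy
    have hiff : (pvKeyB y = toLex (M1, toLex (M2, M3)))
        ↔ (pvLenSum y = M1 ∧ pvPoDist y = M2 ∧ pvSortDist y = M3) := by
      rw [pvKeyB_eq]
      simp [toLex_inj, Prod.mk.injEq]
    simp only [hiff, Bool.decide_and]
    cases hq1 : decide (pvLenSum y = M1) <;> cases hq2 : decide (pvPoDist y = M2) <;>
      cases hq3 : decide (pvSortDist y = M3) <;> simp [hq1, hq2, hq3]

-- A's length-1 early return and the three passes vs a guarded min?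
theorem pvFinal_eq (c : List ((Int × Int) × (Int × Int) × (Int × Int))) :
    (if c.length = 1 then PySem.List.pyGet? c 0
     else (((c.foldl (pvPassStep pvLenSum) (none, [])).2.foldl (pvPassStep pvPoDist) (none, [])).2.foldl pvP3Step (none, none)).2)
    = (if c.isEmpty then none else PySem.List.min? c pvKeyB) := by
  rcases c with _ | ⟨x, xs⟩
  · simp
  · rcases xs with _ | ⟨y, ys⟩
    · simp [PySem.List.pyGet?, PySem.List.pyIdx?, PySem.List.min?]
    · rw [if_neg (by simp), if_neg (by simp)]
      exact pvSelect_min_eq (x :: y :: ys)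

-- ===== B-side lemmas =====

-- fold over a flatMap = nested fold
theorem pvFoldl_flatMap {γ α σ : Type} (f : γ → List α) (g : σ → α → σ) (l : List γ) (i : σ) :
    (l.flatMap f).foldl g i = l.foldl (fun acc x => (f x).foldl g acc) i := by
  induction l generalizing i with
  | nil => rfl
  | cons x xs ih => simp [List.foldl_append, ih]

-- B's triple nested loop = a single fold over the flattened triple product
theorem pvFoldl_triple {σ : Type} (step : σ → (Int × Int) → (Int × Int) → (Int × Int) → σ)
    (subj pred obj : List (Int × Int)) (i : σ) :
    subj.foldl (fun b s => pred.foldl (fun b p => obj.foldl (fun b o => step b s p o) b) b) i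
      = (subj.flatMap (fun s => pred.flatMap (fun p => obj.map (fun o => (s, p, o))))).foldl
          (fun b t => step b t.1 t.2.1 t.2.2) i := by
  rw [pvFoldl_flatMap]
  have h2 : ∀ (s : Int × Int) (b : σ),
      (pred.flatMap (fun p => obj.map (fun o => (s, p, o)))).foldl (fun b t => step b t.1 t.2.1 t.2.2) b
        = pred.foldl (fun b p => obj.foldl (fun b o => step b s p o) b) b := by
    intro s b
    rw [pvFoldl_flatMap]
    have h3 : ∀ (p : Int × Int) (b : σ),
        (obj.map (fun o => (s, p, o))).foldl (fun b t => step b t.1 t.2.1 t.2.2) b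
          = obj.foldl (fun b o => step b s p o) b := by
      intro p b
      rw [List.foldl_map]
    simp only [h3]
  simp only [h2]

-- gate/select normal form of B's step
def pvGStep (gate sel : (Int × Int) × (Int × Int) × (Int × Int) → Bool)
    (st : Option (Lex (Int × Lex (Int × Int)) × ((Int × Int) × (Int × Int) × (Int × Int)))
          × Option (Lex (Int × Lex (Int × Int)) × ((Int × Int) × (Int × Int) × (Int × Int))))
    (t : (Int × Int) × (Int × Int) × (Int × Int)) :
    Option (Lex (Int × Lex (Int × Int)) × ((Int × Int) × (Int × Int) × (Int × Int)))
    × Option (Lex (Int × Lex (Int × Int)) × ((Int × Int) × (Int × Int) × (Int × Int))) :=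
  if gate t then
    if sel t then (st.1, pvUpd st.2 (pvKeyB t) t)
    else (pvUpd st.1 (pvKeyB t) t, st.2)
  else st

theorem pvStepB_false (b) (s p o : Int × Int) :
    pvStepB false b s p o = pvGStep (fun _ => true) pvAnyOverlap b (s, p, o) := by
  simp [pvStepB, pvGStep, pvAnyOverlap]

theorem pvStepB_true (b) (s p o : Int × Int) :
    pvStepB true b s p o
      = pvGStep (fun t => pvAnyOverlap t && decide (t.2.1.1 ≤ t.2.2.1) && decide (t.2.2.2 ≤ t.2.1.2))
          (fun t => pvOverlapB t.1 t.2.1) b (s, p, o) := by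
  simp only [pvStepB, pvGStep, pvAnyOverlap, Bool.true_and]
  cases h : (pvOverlapB s p || pvOverlapB s o || pvOverlapB p o) && decide (p.1 ≤ o.1) && decide (o.2 ≤ p.2) <;>
    simp [h]

-- update on mapped state = one step of pvMinFold, mapped
theorem pvUpd_omap (a : Option ((Int × Int) × (Int × Int) × (Int × Int)))
    (t : (Int × Int) × (Int × Int) × (Int × Int)) :
    pvUpd (a.map (fun y => (pvKeyB y, y))) (pvKeyB t) t
      = (pvMinFold pvKeyB a [t]).map (fun y => (pvKeyB y, y)) := by
  rcases a with _ | m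
  · rfl
  · show pvUpd (some (pvKeyB m, m)) (pvKeyB t) t = _
    by_cases h : pvKeyB t < pvKeyB m
    · simp [pvUpd, pvMinFold, h]
    · simp [pvUpd, pvMinFold, h]

-- streaming invariant: the two state components are the running minima of the two disjoint classes
theorem pvStream_inv (gate sel : (Int × Int) × (Int × Int) × (Int × Int) → Bool)
    (l : List ((Int × Int) × (Int × Int) × (Int × Int)))
    (a b : Option ((Int × Int) × (Int × Int) × (Int × Int))) :
    l.foldl (pvGStep gate sel) (a.map (fun y => (pvKeyB y, y)), b.map (fun y => (pvKeyB y, y)))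
      = ((pvMinFold pvKeyB a (l.filter (fun t => gate t && !sel t))).map (fun y => (pvKeyB y, y)),
         (pvMinFold pvKeyB b (l.filter (fun t => gate t && sel t))).map (fun y => (pvKeyB y, y))) := by
  induction l generalizing a b with
  | nil => rfl
  | cons t ts ih =>
    rw [List.foldl_cons]
    by_cases hg : gate t = true
    · by_cases hs : sel t = true
      · have hstep : pvGStep gate sel (a.map (fun y => (pvKeyB y, y)), b.map (fun y => (pvKeyB y, y))) t
            = (a.map (fun y => (pvKeyB y, y)), (pvMinFold pvKeyB b [t]).map (fun y => (pvKeyB y, y))) := by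
          simp [pvGStep, hg, hs, pvUpd_omap]
        rw [hstep, ih a (pvMinFold pvKeyB b [t])]
        have hc0 : (t :: ts).filter (fun t => gate t && !sel t) = ts.filter (fun t => gate t && !sel t) := by
          simp [List.filter_cons, hg, hs]
        have hc1 : (t :: ts).filter (fun t => gate t && sel t) = t :: ts.filter (fun t => gate t && sel t) := by
          simp [List.filter_cons, hg, hs]
        rw [hc0, hc1]
        rfl
      · have hstep : pvGStep gate sel (a.map (fun y => (pvKeyB y, y)), b.map (fun y => (pvKeyB y, y))) t
            = ((pvMinFold pvKeyB a [t]).map (fun y => (pvKeyB y, y)), b.map (fun y => (pvKeyB y, y))) := by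
          simp [pvGStep, hg, hs, pvUpd_omap]
        rw [hstep, ih (pvMinFold pvKeyB a [t]) b]
        have hc0 : (t :: ts).filter (fun t => gate t && !sel t) = t :: ts.filter (fun t => gate t && !sel t) := by
          simp [List.filter_cons, hg, hs]
        have hc1 : (t :: ts).filter (fun t => gate t && sel t) = ts.filter (fun t => gate t && sel t) := by
          simp [List.filter_cons, hg, hs]
        rw [hc0, hc1]
        rfl
    · have hstep : pvGStep gate sel (a.map (fun y => (pvKeyB y, y)), b.map (fun y => (pvKeyB y, y))) t
          = (a.map (fun y => (pvKeyB y, y)), b.map (fun y => (pvKeyB y, y))) := by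
        simp [pvGStep, hg]
      rw [hstep, ih a b]
      have hc0 : (t :: ts).filter (fun t => gate t && !sel t) = ts.filter (fun t => gate t && !sel t) := by
        simp [List.filter_cons, hg]
      have hc1 : (t :: ts).filter (fun t => gate t && sel t) = ts.filter (fun t => gate t && sel t) := by
        simp [List.filter_cons, hg]
      rw [hc0, hc1]

-- picking primary-then-fallback running minima = A's guarded min? over the chosen candidate list
theorem pvPick (l0 l1 : List ((Int × Int) × (Int × Int) × (Int × Int))) :
    (match ((pvMinFold pvKeyB none l0).map (fun y => (pvKeyB y, y)),
            (pvMinFold pvKeyB none l1).map (fun y => (pvKeyB y, y))) with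
     | (some c, _) => some c.2
     | (none, some c) => some c.2
     | (none, none) => none)
    = (if (if l0.length > 0 then l0 else l1).isEmpty then none
       else PySem.List.min? (if l0.length > 0 then l0 else l1) pvKeyB) := by
  rcases l0 with _ | ⟨x, xs⟩
  · simp only [List.length_nil, gt_iff_lt, lt_self_iff_false, if_false]
    rcases l1 with _ | ⟨y, ys⟩
    · rfl
    · have h : pvMinFold pvKeyB none (y :: ys) = pvMinFold pvKeyB (some y) ys := rfl
      rw [h, pvMinFold_some]
      have h2 : PySem.List.min? (y :: ys) pvKeyB = pvMinFold pvKeyB (some y) ys := rfl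
      rw [h2, pvMinFold_some]
      simp [pvMinFold]
  · have hlen : (x :: xs).length > 0 := Nat.succ_pos _
    rw [if_pos hlen]
    have h : pvMinFold pvKeyB none (x :: xs) = pvMinFold pvKeyB (some x) xs := rfl
    rw [h, pvMinFold_some]
    have h2 : PySem.List.min? (x :: xs) pvKeyB = pvMinFold pvKeyB (some x) xs := rfl
    rw [h2, pvMinFold_some]
    simp

-- pvStream_inv specialized to the port's initial state
theorem pvStream_none (gate sel : (Int × Int) × (Int × Int) × (Int × Int) → Bool)
    (l : List ((Int × Int) × (Int × Int) × (Int × Int))) :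
    l.foldl (pvGStep gate sel) (none, none)
      = ((pvMinFold pvKeyB none (l.filter (fun t => gate t && !sel t))).map (fun y => (pvKeyB y, y)),
         (pvMinFold pvKeyB none (l.filter (fun t => gate t && sel t))).map (fun y => (pvKeyB y, y))) := by
  have h := pvStream_inv gate sel l none none
  simpa using h

-- ===== VERDICT (by name: the statement is the Claim_ definition above) =====
theorem select_spans_spec : Claim_equal_select_spans := by
  intro subj pred obj nested hdom
  show select_spans subj pred obj nested = select_spans_alt subj pred obj nested
  unfold select_spans select_spans_alt
  rw [pvFoldl_triple (pvStepB nested)]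
  by_cases hemp : subj.length = 0 ∨ pred.length = 0 ∨ obj.length = 0
  · rw [if_pos hemp]
    have htr : subj.flatMap (fun s => pred.flatMap (fun p => obj.map (fun o => (s, p, o)))) = ([] : List ((Int × Int) × (Int × Int) × (Int × Int))) := by
      rcases hemp with h | h | h <;> rw [List.length_eq_zero_iff] at h <;> simp [h]
    rw [htr]
    rfl
  · rw [if_neg hemp]
    simp only [pvBuildA]
    simp only [pvOverlap_eq]
    simp only [pvFoldl_partition3, List.nil_append]
    generalize (subj.flatMap (fun s => pred.flatMap (fun p => obj.map (fun o => (s, p, o))))) = tr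
    cases nested
    · -- non-nested: preferred class = non-touching, fallback = touching
      have hstep : (fun (b : Option (Lex (Int × Lex (Int × Int)) × ((Int × Int) × (Int × Int) × (Int × Int)))
              × Option (Lex (Int × Lex (Int × Int)) × ((Int × Int) × (Int × Int) × (Int × Int))))
            (t : (Int × Int) × (Int × Int) × (Int × Int)) => pvStepB false b t.1 t.2.1 t.2.2)
          = pvGStep (fun _ => true) pvAnyOverlap := by
        funext b t
        rcases t with ⟨s, p, o⟩
        exact pvStepB_false b s p o
      rw [hstep, pvStream_none]
      simp only [Bool.true_and, Bool.false_eq_true, if_false]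
      rw [pvFinal_eq]
      exact (pvPick (tr.filter (fun t => !pvAnyOverlap t)) (tr.filter pvAnyOverlap)).symm
    · -- nested: both classes inside the contained-and-touching gate, split on subject-predicate overlap
      have hstep : (fun (b : Option (Lex (Int × Lex (Int × Int)) × ((Int × Int) × (Int × Int) × (Int × Int)))
              × Option (Lex (Int × Lex (Int × Int)) × ((Int × Int) × (Int × Int) × (Int × Int))))
            (t : (Int × Int) × (Int × Int) × (Int × Int)) => pvStepB true b t.1 t.2.1 t.2.2)
          = pvGStep (fun t => pvAnyOverlap t && decide (t.2.1.1 ≤ t.2.2.1) && decide (t.2.2.2 ≤ t.2.1.2))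
              (fun t => pvOverlapB t.1 t.2.1) := by
        funext b t
        rcases t with ⟨s, p, o⟩
        exact pvStepB_true b s p o
      rw [hstep, pvStream_none]
      simp only [reduceIte]
      have hA0 : (tr.filter pvAnyOverlap).filter
            (fun t => (decide (t.2.1.1 ≤ t.2.2.1) && decide (t.2.2.2 ≤ t.2.1.2)) && !pvOverlapB t.1 t.2.1)
          = tr.filter (fun t => (pvAnyOverlap t && decide (t.2.1.1 ≤ t.2.2.1) && decide (t.2.2.2 ≤ t.2.1.2)) && !pvOverlapB t.1 t.2.1) := by
        rw [List.filter_filter]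
        refine List.filter_congr ?_
        intro a _
        cases h1 : pvAnyOverlap a <;> cases h2 : decide (a.2.1.1 ≤ a.2.2.1) <;>
          cases h3 : decide (a.2.2.2 ≤ a.2.1.2) <;> cases h4 : pvOverlapB a.1 a.2.1 <;>
          simp [h1, h2, h3, h4]
      have hA1 : (tr.filter pvAnyOverlap).filter
            (fun t => (decide (t.2.1.1 ≤ t.2.2.1) && decide (t.2.2.2 ≤ t.2.1.2)) && !(!pvOverlapB t.1 t.2.1))
          = tr.filter (fun t => (pvAnyOverlap t && decide (t.2.1.1 ≤ t.2.2.1) && decide (t.2.2.2 ≤ t.2.1.2)) && pvOverlapB t.1 t.2.1) := by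
        rw [List.filter_filter]
        refine List.filter_congr ?_
        intro a _
        cases h1 : pvAnyOverlap a <;> cases h2 : decide (a.2.1.1 ≤ a.2.2.1) <;>
          cases h3 : decide (a.2.2.2 ≤ a.2.1.2) <;> cases h4 : pvOverlapB a.1 a.2.1 <;>
          simp [h1, h2, h3, h4]
      rw [hA0, hA1, pvFinal_eq]
      exact (pvPick _ _).symm
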